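-- pv_equiv track=rewrite | github.com/augustedupin123/reactpractice | sch1.py | function
-- ===== SOURCE A (Python) =====
-- def function(N,arr):
-- 	sum1 = 0
-- 	list1 = []
-- 	for i in range(len(arr)):
-- 		for j in range(i,len(arr)):
-- 			if(arr[j]<=arr[i]):
-- 				sum1 = sum1 + 1
-- 		list1.append(sum1)
-- 		sum1 = 0
-- 	return(max(list1))
-- ===== SOURCE B (Python) =====
-- def function(N, arr):
--     # Right-to-left sweep keeping the already-seen suffix as a sorted list:
--     # for each element, its count of later-or-equal elements <= it is its
--     # insertion position in that sorted list, plus one for itself.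
--     best = 0
--     seen = []  # sorted ascending multiset of elements strictly to the right
--     for x in reversed(arr):
--         pos = 0
--         while pos < len(seen) and seen[pos] <= x:
--             pos += 1
--         seen.insert(pos, x)
--         if pos + 1 > best:
--             best = pos + 1
--     return best
-- ===== Notes on version B (the rewrite author's own statement) =====
-- stated objective: alternative
-- what changed: Replaced the nested index double loop with a single right-to-left sweep that maintains the already-processed suffix as a sorted list; each element's answer is its insertion position plus one, and a running maximum replaces building the list of counts and taking max at the end.
import Mathlib
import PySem

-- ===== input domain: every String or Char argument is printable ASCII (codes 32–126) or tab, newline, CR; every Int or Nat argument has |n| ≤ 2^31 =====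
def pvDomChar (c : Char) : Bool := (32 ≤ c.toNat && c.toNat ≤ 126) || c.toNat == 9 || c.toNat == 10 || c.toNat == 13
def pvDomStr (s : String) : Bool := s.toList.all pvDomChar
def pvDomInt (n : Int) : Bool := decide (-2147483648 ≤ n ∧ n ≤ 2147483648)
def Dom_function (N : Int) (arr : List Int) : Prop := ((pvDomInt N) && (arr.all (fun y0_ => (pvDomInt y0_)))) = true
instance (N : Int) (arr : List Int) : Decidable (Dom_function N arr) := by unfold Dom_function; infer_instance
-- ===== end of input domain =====

-- B replaces the nested index double loop by one right-to-left sweep that keeps the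
-- already-seen suffix as a sorted list (each element's count = insertion position + 1)
-- with a running maximum; equivalence is proved on nonempty arr (A raises on []).

-- ===== PORT A =====
def function (N : Int) (arr : List Int) : Int :=
  let list1 := (PySem.List.pyRange 0 (PySem.List.len arr) 1).foldl
    (fun list1 i =>
      let sum1 := (PySem.List.pyRange i (PySem.List.len arr) 1).foldl
        (fun sum1 j =>
          if PySem.List.pyGetD arr j 0 ≤ PySem.List.pyGetD arr i 0 then sum1 + 1 else sum1)
        0
      list1 ++ [sum1])
    []
  ((PySem.List.max? list1 (fun x => x)).getD 0)   -- max(list1); none (empty list) excluded by Pre_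

-- ===== PORT B =====
-- the while loop 'pos = 0; while pos < len(seen) and seen[pos] <= x: pos += 1'
def posLE (seen : List Int) (x : Int) : Nat :=
  match seen with
  | [] => 0
  | y :: ys => if y ≤ x then posLE ys x + 1 else 0

def function_alt (N : Int) (arr : List Int) : Int :=
  (arr.reverse.foldl
    (fun (st : Int × List Int) x =>
      let pos := posLE st.2 x
      let seen := PySem.List.insert st.2 (pos : Int) x
      (if (pos : Int) + 1 > st.1 then (pos : Int) + 1 else st.1, seen))
    (0, [])).1

-- ===== PRECONDITION & SPEC =====
-- Pre_ excludes only the empty list, on which A raises ValueError (max of an empty sequence).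
def Pre_function (N : Int) (arr : List Int) : Prop := arr ≠ []
instance (N : Int) (arr : List Int) : Decidable (Pre_function N arr) := by unfold Pre_function; infer_instance
def pvWitness_function : Int × List Int := (3, [1, 2, 2])

def Spec_function (N : Int) (arr : List Int) (out : Int) : Prop := out = function_alt N arr
instance (N : Int) (arr : List Int) (out : Int) : Decidable (Spec_function N arr out) := by unfold Spec_function; infer_instance

-- ===== CLAIM (what is proved, stated in full; the proofs are below) =====
def Claim_equal_function : Prop := ∀ (N : Int) (arr : List Int), Dom_function N arr → Pre_function N arr → Spec_function N arr (function N arr)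

-- ===== LEMMAS AND PROOFS =====

-- the list A builds: counts of later-or-equal elements ≤ arr[k], one per index
def cnts (arr : List Int) : List Int :=
  (List.range arr.length).map
    (fun k => ((arr.drop k).countP (fun a => decide (a ≤ arr.getD k 0)) : Int))

lemma function_eq (N : Int) (arr : List Int) :
    function N arr = (PySem.List.max? (cnts arr) (fun x => x)).getD 0 := by
  unfold function cnts
  simp only [PySem.List.len_eq, PySem.List.foldl_append_singleton_eq_map, List.nil_append,
    PySem.List.pyRange_zero_natCast, List.map_map]
  congr 2
  apply List.map_congr_left
  intro k _
  simp only [Function.comp_apply]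
  rw [PySem.List.foldl_pyRange_pyGetD' arr 0
      (fun s a => if a ≤ PySem.List.pyGetD arr (k : Int) 0 then s + 1 else s) 0
      (Int.natCast_nonneg k)]
  simp only [PySem.List.pyGetD_natCast, Int.toNat_natCast]
  rw [show (fun (s : Int) (a : Int) => if a ≤ arr.getD k 0 then s + 1 else s)
      = (fun (s : Int) (a : Int) =>
          if (fun a : Int => decide (a ≤ arr.getD k 0)) a = true then s + 1 else s) by
    funext s a; simp]
  rw [PySem.List.foldl_count_if]
  simp

lemma posLE_le (x : Int) : ∀ seen : List Int, posLE seen x ≤ seen.length := by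
  intro seen
  induction seen with
  | nil => simp [posLE]
  | cons y ys ih =>
    simp only [posLE, List.length_cons]
    split <;> omega

lemma posLE_sorted (x : Int) : ∀ seen : List Int, seen.Pairwise (· ≤ ·) →
    posLE seen x = seen.countP (fun a => decide (a ≤ x)) := by
  intro seen
  induction seen with
  | nil => simp [posLE]
  | cons y ys ih =>
    intro hp
    rw [List.pairwise_cons] at hp
    by_cases h : y ≤ x
    · simp only [posLE, if_pos h, List.countP_cons, h, decide_true, if_true]
      rw [ih hp.2]
    · have hz : ys.countP (fun a => decide (a ≤ x)) = 0 :=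
        List.countP_eq_zero.2 (fun a ha => by have := hp.1 a ha; simp; omega)
      simp [posLE, h, List.countP_cons, hz]

lemma insert_posLE_pairwise (x : Int) : ∀ seen : List Int, seen.Pairwise (· ≤ ·) →
    (seen.take (posLE seen x) ++ x :: seen.drop (posLE seen x)).Pairwise (· ≤ ·) := by
  intro seen
  induction seen with
  | nil => simp [posLE]
  | cons y ys ih =>
    intro hp
    rw [List.pairwise_cons] at hp
    by_cases h : y ≤ x
    · simp only [posLE, if_pos h]
      simp only [List.take_succ_cons, List.drop_succ_cons, List.cons_append]
      rw [List.pairwise_cons]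
      constructor
      · intro a ha
        rcases List.mem_append.1 ha with h1 | h1
        · exact hp.1 a (List.mem_of_mem_take h1)
        · rcases List.mem_cons.1 h1 with h2 | h2
          · omega
          · exact hp.1 a (List.mem_of_mem_drop h2)
      · exact ih hp.2
    · simp only [posLE, if_neg h]
      simp only [List.take_zero, List.drop_zero, List.nil_append]
      rw [List.pairwise_cons]
      refine ⟨?_, List.pairwise_cons.2 hp⟩
      intro a ha
      rcases List.mem_cons.1 ha with h1 | h1
      · omega
      · have := hp.1 a h1
        omega

lemma foldl_max_shift : ∀ (l : List Int) (a b : Int),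
    l.foldl max (max a b) = max a (l.foldl max b) := by
  intro l
  induction l with
  | nil => intro a b; rfl
  | cons c l ih =>
    intro a b
    simp only [List.foldl_cons]
    rw [max_assoc]
    exact ih a (max b c)

lemma cnts_cons (x : Int) (rest : List Int) :
    cnts (x :: rest) = (((x :: rest).countP (fun a => decide (a ≤ x)) : Int)) :: cnts rest := by
  unfold cnts
  rw [List.length_cons, List.range_succ_eq_map, List.map_cons, List.map_map]
  congr 1

lemma inv_B : ∀ arr : List Int,
    (arr.foldr
      (fun x (st : Int × List Int) =>
        (if (posLE st.2 x : Int) + 1 > st.1 then (posLE st.2 x : Int) + 1 else st.1,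
          PySem.List.insert st.2 ((posLE st.2 x : Nat) : Int) x))
      ((0 : Int), ([] : List Int))).2.Perm arr ∧
    (arr.foldr
      (fun x (st : Int × List Int) =>
        (if (posLE st.2 x : Int) + 1 > st.1 then (posLE st.2 x : Int) + 1 else st.1,
          PySem.List.insert st.2 ((posLE st.2 x : Nat) : Int) x))
      ((0 : Int), ([] : List Int))).2.Pairwise (· ≤ ·) ∧
    (arr.foldr
      (fun x (st : Int × List Int) =>
        (if (posLE st.2 x : Int) + 1 > st.1 then (posLE st.2 x : Int) + 1 else st.1,
          PySem.List.insert st.2 ((posLE st.2 x : Nat) : Int) x))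
      ((0 : Int), ([] : List Int))).1 = (cnts arr).foldl max 0 := by
  intro arr
  induction arr with
  | nil =>
    refine ⟨List.Perm.refl _, List.Pairwise.nil, ?_⟩
    simp [cnts]
  | cons x rest ih =>
    obtain ⟨hperm, hsort, hbest⟩ := ih
    simp only [List.foldr_cons]
    set st := rest.foldr
      (fun x (st : Int × List Int) =>
        (if (posLE st.2 x : Int) + 1 > st.1 then (posLE st.2 x : Int) + 1 else st.1,
          PySem.List.insert st.2 ((posLE st.2 x : Nat) : Int) x))
      ((0 : Int), ([] : List Int)) with hst
    have hins : PySem.List.insert st.2 ((posLE st.2 x : Nat) : Int) x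
        = st.2.take (posLE st.2 x) ++ x :: st.2.drop (posLE st.2 x) :=
      PySem.List.insert_natCast _ _ _ (posLE_le x st.2)
    have hpos : posLE st.2 x = rest.countP (fun a => decide (a ≤ x)) := by
      rw [posLE_sorted x st.2 hsort, hperm.countP_eq]
    have hc0 : ((x :: rest).countP (fun a => decide (a ≤ x)) : Int)
        = (posLE st.2 x : Int) + 1 := by
      rw [List.countP_cons, hpos]
      simp
    refine ⟨?_, ?_, ?_⟩
    · rw [hins]
      have h1 : (st.2.take (posLE st.2 x) ++ x :: st.2.drop (posLE st.2 x)).Perm (x :: st.2) := by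
        simpa [List.take_append_drop] using
          (List.perm_middle (a := x) (l₁ := st.2.take (posLE st.2 x))
            (l₂ := st.2.drop (posLE st.2 x)))
      exact h1.trans (hperm.cons x)
    · rw [hins]
      exact insert_posLE_pairwise x st.2 hsort
    · rw [cnts_cons, List.foldl_cons, hc0, hbest]
      rw [show max (0 : Int) ((posLE st.2 x : Int) + 1) = max ((posLE st.2 x : Int) + 1) 0 from max_comm _ _]
      rw [foldl_max_shift]
      split <;> omega

-- ===== VERDICT (by name: the statement is the Claim_ definition above) =====
theorem function_spec : Claim_equal_function := by
  intro N arr _ hpre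
  unfold Spec_function
  rw [function_eq]
  unfold function_alt
  rw [List.foldl_reverse]
  simp only []
  obtain ⟨_, _, hbest⟩ := inv_B arr
  rw [hbest]
  cases arr with
  | nil => exact absurd rfl hpre
  | cons a t =>
    rw [cnts_cons, PySem.List.max?_id_cons, Option.getD_some, List.foldl_cons,
      max_eq_right (Int.natCast_nonneg _)]
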